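-- pv_equiv track=rewrite | github.com/IuliaRadulescu/DynamicTextAnalysis | plotAlluvial.py | parseAlluvialData
-- ===== SOURCE A (Python) =====
-- def parseAlluvialData(alluvialData):
--
--   labels = []
--   source = []
--   target = []
--   value = []
--
--   for key in alluvialData:
--     items = alluvialData[key]
--     if key not in labels:
--         labels.append(key)
--     for item in items:
--         if item not in labels:
--             labels.append(item)
--
--   for key in alluvialData:
--     items = alluvialData[key]
--     source.extend([labels.index(key)]*len(items))
--     itemsIndices = list(map(lambda x: labels.index(x), items))
--     target.extend(itemsIndices)
--     value.extend([1]*len(items))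
--
--   return (labels, source, target, value)
-- ===== SOURCE B (Python) =====
-- def parseAlluvialData(alluvialData):
--     labels = []
--     index_of = {}
--     source = []
--     target = []
--     value = []
--     for key, items in alluvialData.items():
--         ki = index_of.get(key)
--         if ki is None:
--             ki = len(labels)
--             index_of[key] = ki
--             labels.append(key)
--         for item in items:
--             ti = index_of.get(item)
--             if ti is None:
--                 ti = len(labels)
--                 index_of[item] = ti
--                 labels.append(item)
--             source.append(ki)
--             target.append(ti)
--             value.append(1)
--     return (labels, source, target, value)
-- ===== Notes on version B (the rewrite author's own statement) =====
-- stated objective: faster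
-- what changed: B fuses A's two passes over the data into one and replaces A's linear 'in labels' membership tests and labels.index scans with a label-to-index dict maintained alongside labels, so no list is ever scanned.
import Mathlib
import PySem

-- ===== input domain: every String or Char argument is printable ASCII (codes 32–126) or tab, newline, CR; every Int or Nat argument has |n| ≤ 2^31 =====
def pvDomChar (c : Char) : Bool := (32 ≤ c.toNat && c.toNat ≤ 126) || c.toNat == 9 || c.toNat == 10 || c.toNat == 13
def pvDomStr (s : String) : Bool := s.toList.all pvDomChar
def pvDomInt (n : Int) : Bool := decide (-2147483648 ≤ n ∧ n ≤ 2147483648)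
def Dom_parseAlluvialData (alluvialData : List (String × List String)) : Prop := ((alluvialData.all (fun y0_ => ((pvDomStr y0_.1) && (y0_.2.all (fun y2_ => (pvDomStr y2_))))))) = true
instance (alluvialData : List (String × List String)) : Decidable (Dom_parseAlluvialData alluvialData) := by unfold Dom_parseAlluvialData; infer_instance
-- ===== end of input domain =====

-- B replaces A's two passes (and its repeated linear `in`/`.index` scans of `labels`) by a single
-- fused pass that also maintains a label→index dict; objective: faster (no inner list scans).

-- ===== PORT A =====
-- `if x not in labels: labels.append(x)`
def pvAddLabel (labels : List String) (x : String) : List String :=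
  if labels.contains x then labels else labels ++ [x]

-- `labels.index(x)` (Python raises ValueError if absent; here every indexed element is in `labels`,
-- so the `.getD 0` default is never reached)
def pvIdx (labels : List String) (x : String) : Int :=
  Int.ofNat ((PySem.List.index? labels x).getD 0)

-- body of A's first loop, for one (key, items) pair
def pvLabelsStep (labels : List String) (kv : String × List String) : List String :=
  kv.2.foldl pvAddLabel (pvAddLabel labels kv.1)

-- body of A's second loop, for one (key, items) pair
def pvSTVStep (labels : List String) (stv : List Int × List Int × List Int)
    (kv : String × List String) : List Int × List Int × List Int :=
  (stv.1 ++ List.replicate kv.2.length (pvIdx labels kv.1),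
   stv.2.1 ++ kv.2.map (fun x => pvIdx labels x),
   stv.2.2 ++ List.replicate kv.2.length 1)

def parseAlluvialData (alluvialData : List (String × List String)) :
    List String × List Int × List Int × List Int :=
  -- the Python function receives a dict: duplicate keys collapse (first position, last value)
  let pairs := (PySem.Dict.ofList alluvialData).items
  let labels := pairs.foldl pvLabelsStep []
  let stv := pairs.foldl (pvSTVStep labels) ([], [], [])
  (labels, stv.1, stv.2.1, stv.2.2)

-- ===== PORT B =====
-- B's `_intern`: look x up in the index dict; if unseen, give it the next index and append it
def pvIntern (labels : List String) (ix : PySem.Dict String Int) (x : String) :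
    Int × List String × PySem.Dict String Int :=
  match ix.get? x with
  | some i => (i, labels, ix)
  | none => ((labels.length : Int), labels ++ [x], ix.insert x (labels.length : Int))

-- body of B's inner loop (one item), ki fixed by the enclosing pair
def pvStepInner (ki : Int)
    (st : List String × PySem.Dict String Int × List Int × List Int × List Int)
    (item : String) :
    List String × PySem.Dict String Int × List Int × List Int × List Int :=
  let r := pvIntern st.1 st.2.1 item
  (r.2.1, r.2.2, st.2.2.1 ++ [ki], st.2.2.2.1 ++ [r.1], st.2.2.2.2 ++ [1])

-- body of B's outer loop (one (key, items) pair)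
def pvStepB (st : List String × PySem.Dict String Int × List Int × List Int × List Int)
    (kv : String × List String) :
    List String × PySem.Dict String Int × List Int × List Int × List Int :=
  let r := pvIntern st.1 st.2.1 kv.1
  kv.2.foldl (pvStepInner r.1) (r.2.1, r.2.2, st.2.2.1, st.2.2.2.1, st.2.2.2.2)

def parseAlluvialData_alt (alluvialData : List (String × List String)) :
    List String × List Int × List Int × List Int :=
  let pairs := (PySem.Dict.ofList alluvialData).items
  let st := pairs.foldl pvStepB ([], PySem.Dict.empty, [], [], [])
  (st.1, st.2.2.1, st.2.2.2.1, st.2.2.2.2)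

-- ===== PRECONDITION & SPEC =====
def Spec_parseAlluvialData (alluvialData : List (String × List String)) (out : List String × List Int × List Int × List Int) : Prop := out = parseAlluvialData_alt alluvialData
instance (alluvialData : List (String × List String)) (out : List String × List Int × List Int × List Int) : Decidable (Spec_parseAlluvialData alluvialData out) := by unfold Spec_parseAlluvialData; infer_instance

-- ===== CLAIM (what is proved, stated in full; the proofs are below) =====
def Claim_equal_parseAlluvialData : Prop := ∀ (alluvialData : List (String × List String)), Dom_parseAlluvialData alluvialData → Spec_parseAlluvialData alluvialData (parseAlluvialData alluvialData)

-- ===== LEMMAS AND PROOFS =====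

-- the index dict of B mirrors positions in `labels`
def pvInv (ix : PySem.Dict String Int) (labels : List String) : Prop :=
  ∀ x, ix.get? x = (PySem.List.index? labels x).map Int.ofNat

theorem pvAddLabel_ext (labels : List String) (x : String) :
    ∃ e, pvAddLabel labels x = labels ++ e := by
  unfold pvAddLabel; split
  · exact ⟨[], by simp⟩
  · exact ⟨[x], rfl⟩

theorem pvFoldAdd_ext (items : List String) : ∀ labels : List String,
    ∃ e, items.foldl pvAddLabel labels = labels ++ e := by
  induction items with
  | nil => exact fun labels => ⟨[], by simp⟩
  | cons a items ih =>
      intro labels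
      obtain ⟨e1, h1⟩ := pvAddLabel_ext labels a
      obtain ⟨e2, h2⟩ := ih (pvAddLabel labels a)
      exact ⟨e1 ++ e2, by rw [List.foldl_cons, h2, h1, List.append_assoc]⟩

theorem pvFoldStepA_ext (pairs : List (String × List String)) : ∀ labels : List String,
    ∃ e, pairs.foldl pvLabelsStep labels = labels ++ e := by
  induction pairs with
  | nil => exact fun labels => ⟨[], by simp⟩
  | cons kv pairs ih =>
      intro labels
      obtain ⟨e0, h0⟩ := pvAddLabel_ext labels kv.1
      obtain ⟨e1, h1⟩ := pvFoldAdd_ext kv.2 (pvAddLabel labels kv.1)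
      obtain ⟨e2, h2⟩ := ih (pvLabelsStep labels kv)
      refine ⟨e0 ++ (e1 ++ e2), ?_⟩
      rw [List.foldl_cons, h2]
      show kv.2.foldl pvAddLabel (pvAddLabel labels kv.1) ++ e2 = _
      rw [h1, h0]
      simp [List.append_assoc]

theorem pvIdx_append (labels e : List String) (x : String) (hx : x ∈ labels) :
    pvIdx (labels ++ e) x = pvIdx labels x := by
  unfold pvIdx
  rw [PySem.List.index?_append_of_mem e hx]

theorem pvMem_addLabel_self (labels : List String) (x : String) :
    x ∈ pvAddLabel labels x := by
  unfold pvAddLabel; split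
  · next h => exact (List.contains_iff_mem).1 h
  · simp

theorem pvIntern_spec (labels : List String) (ix : PySem.Dict String Int) (x : String)
    (hInv : pvInv ix labels) :
    ∃ ix', pvIntern labels ix x =
        (pvIdx (pvAddLabel labels x) x, pvAddLabel labels x, ix') ∧
      pvInv ix' (pvAddLabel labels x) := by
  by_cases hx : x ∈ labels
  · obtain ⟨k, hk⟩ := Option.isSome_iff_exists.1
      ((PySem.List.index?_isSome_iff labels x).2 hx)
    have hget : ix.get? x = some (Int.ofNat k) := by rw [hInv x, hk]; rfl
    have hadd : pvAddLabel labels x = labels := by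
      unfold pvAddLabel; rw [if_pos (List.contains_iff_mem.2 hx)]
    refine ⟨ix, ?_, by rw [hadd]; exact hInv⟩
    unfold pvIntern
    rw [hget, hadd]
    unfold pvIdx
    rw [hk]
    rfl
  · have hnone : PySem.List.index? labels x = none :=
      (PySem.List.index?_eq_none_iff labels x).2 hx
    have hget : ix.get? x = none := by rw [hInv x, hnone]; rfl
    have hadd : pvAddLabel labels x = labels ++ [x] := by
      unfold pvAddLabel
      rw [if_neg (by simp [hx])]
    refine ⟨ix.insert x (labels.length : Int), ?_, ?_⟩
    · unfold pvIntern
      rw [hget, hadd]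
      have hpi : pvIdx (labels ++ [x]) x = (labels.length : Int) := by
        unfold pvIdx
        rw [PySem.List.index?_append_singleton_self labels x hx]
        rfl
      rw [hpi]
    · intro y
      by_cases hyx : y = x
      · subst hyx
        rw [PySem.Dict.get?_insert_self, hadd,
          PySem.List.index?_append_singleton_self labels y hx]
        rfl
      · rw [PySem.Dict.get?_insert_of_ne ix _ hyx, hInv y, hadd]
        by_cases hy : y ∈ labels
        · rw [PySem.List.index?_append_of_mem [x] hy]
        · rw [(PySem.List.index?_eq_none_iff labels y).2 hy,
            (PySem.List.index?_eq_none_iff (labels ++ [x]) y).2 (by simp [hy, hyx])]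

theorem pvInner
    (items : List String) : ∀ (labels : List String) (ix : PySem.Dict String Int)
    (s t v : List Int) (ki : Int) (L : List String),
    pvInv ix labels →
    (∃ e, L = items.foldl pvAddLabel labels ++ e) →
    ∃ ix', items.foldl (pvStepInner ki) (labels, ix, s, t, v) =
        (items.foldl pvAddLabel labels, ix',
          s ++ List.replicate items.length ki,
          t ++ items.map (fun x => pvIdx L x),
          v ++ List.replicate items.length 1) ∧
      pvInv ix' (items.foldl pvAddLabel labels) := by
  induction items with
  | nil =>
      intro labels ix s t v ki L hInv _
      exact ⟨ix, by simp, hInv⟩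
  | cons a items ih =>
      intro labels ix s t v ki L hInv hL
      obtain ⟨ix1, hIntern, hInv1⟩ := pvIntern_spec labels ix a hInv
      obtain ⟨e, he⟩ := hL
      have hL' : ∃ e', L = items.foldl pvAddLabel (pvAddLabel labels a) ++ e' :=
        ⟨e, by rw [he]; simp [List.foldl_cons]⟩
      obtain ⟨ix', hfold, hInv'⟩ :=
        ih (pvAddLabel labels a) ix1 (s ++ [ki])
          (t ++ [pvIdx (pvAddLabel labels a) a]) (v ++ [1]) ki L hInv1 hL'
      refine ⟨ix', ?_, by simpa [List.foldl_cons] using hInv'⟩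
      have hstep : pvStepInner ki (labels, ix, s, t, v) a =
          (pvAddLabel labels a, ix1, s ++ [ki], t ++ [pvIdx (pvAddLabel labels a) a], v ++ [1]) := by
        unfold pvStepInner; rw [hIntern]
      have hidx : pvIdx (pvAddLabel labels a) a = pvIdx L a := by
        obtain ⟨e1, he1⟩ := pvFoldAdd_ext items (pvAddLabel labels a)
        rw [List.foldl_cons] at he
        rw [he, he1, List.append_assoc,
          pvIdx_append _ _ _ (pvMem_addLabel_self labels a)]
      rw [List.foldl_cons, hstep, hfold]
      simp [hidx, List.replicate_succ, List.append_assoc]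

theorem pvOuter
    (pairs : List (String × List String)) : ∀ (labels : List String)
    (ix : PySem.Dict String Int) (s t v : List Int) (L : List String),
    pvInv ix labels →
    (∃ e, L = pairs.foldl pvLabelsStep labels ++ e) →
    ∃ ix', pairs.foldl pvStepB (labels, ix, s, t, v) =
        (pairs.foldl pvLabelsStep labels, ix',
          (pairs.foldl (pvSTVStep L) (s, t, v)).1,
          (pairs.foldl (pvSTVStep L) (s, t, v)).2.1,
          (pairs.foldl (pvSTVStep L) (s, t, v)).2.2) ∧
      pvInv ix' (pairs.foldl pvLabelsStep labels) := by
  induction pairs with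
  | nil =>
      intro labels ix s t v L hInv _
      exact ⟨ix, by simp, hInv⟩
  | cons kv pairs ih =>
      intro labels ix s t v L hInv hL
      obtain ⟨ix1, hIntern, hInv1⟩ := pvIntern_spec labels ix kv.1 hInv
      obtain ⟨e, he⟩ := hL
      rw [List.foldl_cons] at he
      have hepv : pvLabelsStep labels kv = kv.2.foldl pvAddLabel (pvAddLabel labels kv.1) := rfl
      rw [hepv] at he
      -- prefix chain for the inner lemma
      have hLinner : ∃ e', L = kv.2.foldl pvAddLabel (pvAddLabel labels kv.1) ++ e' := by
        obtain ⟨e2, he2⟩ := pvFoldStepA_ext pairs (kv.2.foldl pvAddLabel (pvAddLabel labels kv.1))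
        exact ⟨e2 ++ e, by rw [he, he2, List.append_assoc]⟩
      obtain ⟨ix2, hfoldIn, hInv2⟩ :=
        pvInner kv.2 (pvAddLabel labels kv.1) ix1 s t v
          (pvIdx (pvAddLabel labels kv.1) kv.1) L hInv1 hLinner
      have hki : pvIdx (pvAddLabel labels kv.1) kv.1 = pvIdx L kv.1 := by
        obtain ⟨e1, he1⟩ := pvFoldAdd_ext kv.2 (pvAddLabel labels kv.1)
        obtain ⟨e2, he2⟩ := pvFoldStepA_ext pairs (kv.2.foldl pvAddLabel (pvAddLabel labels kv.1))
        rw [he, he2, he1, List.append_assoc, List.append_assoc,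
          pvIdx_append _ _ _ (pvMem_addLabel_self labels kv.1)]
      have hstepB : pvStepB (labels, ix, s, t, v) kv =
          kv.2.foldl (pvStepInner (pvIdx (pvAddLabel labels kv.1) kv.1))
            (pvAddLabel labels kv.1, ix1, s, t, v) := by
        unfold pvStepB; rw [hIntern]
      obtain ⟨ix', hfold, hInv'⟩ :=
        ih (kv.2.foldl pvAddLabel (pvAddLabel labels kv.1)) ix2
          (s ++ List.replicate kv.2.length (pvIdx L kv.1))
          (t ++ kv.2.map (fun x => pvIdx L x))
          (v ++ List.replicate kv.2.length 1) L hInv2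
          ⟨e, he⟩
      refine ⟨ix', ?_, by rw [List.foldl_cons, hepv]; exact hInv'⟩
      rw [List.foldl_cons, hstepB, hfoldIn, hki, hfold,
        List.foldl_cons (f := pvLabelsStep), hepv,
        List.foldl_cons (f := pvSTVStep L)]
      have hstv : pvSTVStep L (s, t, v) kv =
          (s ++ List.replicate kv.2.length (pvIdx L kv.1),
           t ++ kv.2.map (fun x => pvIdx L x),
           v ++ List.replicate kv.2.length 1) := rfl
      rw [hstv]

theorem pvInv_empty : pvInv PySem.Dict.empty [] := by
  intro x
  rw [PySem.Dict.get?_empty, (PySem.List.index?_eq_none_iff [] x).2 (by simp)]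
  rfl

-- ===== VERDICT (by name: the statement is the Claim_ definition above) =====
theorem parseAlluvialData_spec : Claim_equal_parseAlluvialData := by
  intro alluvialData _
  unfold Spec_parseAlluvialData parseAlluvialData parseAlluvialData_alt
  obtain ⟨ix', hfold, _⟩ :=
    pvOuter (PySem.Dict.ofList alluvialData).items [] PySem.Dict.empty [] [] []
      ((PySem.Dict.ofList alluvialData).items.foldl pvLabelsStep [])
      pvInv_empty ⟨[], by simp⟩
  simp only [hfold]
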